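-- pv_equiv track=rewrite | github.com/PlexCemex/Plantomat | scripts/prepare_udea_sensor_dataset.py | find_best_column
-- ===== SOURCE A (Python) =====
-- from typing import Dict, Iterable, List, Optional, Tuple
--
-- def find_best_column(normalized_columns: Dict[str, str], positive: Iterable[str], negative: Iterable[str] | None = None) -> Optional[str]:
--     positive = list(positive)
--     negative = list(negative or [])
--     best_col = None
--     best_score = 0
--     for original, norm in normalized_columns.items():
--         score = 0
--         for token in positive:
--             if token in norm:
--                 score += 2 if norm == token else 1
--         for token in negative:
--             if token in norm:
--                 score -= 2 if norm == token else 1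
--         if score > best_score:
--             best_score = score
--             best_col = original
--     return best_col
-- ===== SOURCE B (Python) =====
-- def find_best_column(normalized_columns, positive, negative=None):
--     # token-major accumulation: one score per column, filled token by token,
--     # then a single selection pass in insertion order.
--     scores = {orig: 0 for orig in normalized_columns}
--     for token in positive:
--         for orig, norm in normalized_columns.items():
--             if token in norm:
--                 scores[orig] += 2 if norm == token else 1
--     for token in (negative or []):
--         for orig, norm in normalized_columns.items():
--             if token in norm:
--                 scores[orig] -= 2 if norm == token else 1
--     best = None
--     best_score = 0
--     for orig in normalized_columns:
--         if scores[orig] > best_score: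
--             best_score = scores[orig]
--             best = orig
--     return best
-- ===== Notes on version B (the rewrite author's own statement) =====
-- stated objective: alternative
-- what changed: Replaced the column-major scoring (compute each column's full score inside the selection loop) by a token-major accumulation into a score dict built first, followed by a separate selection pass over the columns.
import Mathlib
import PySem

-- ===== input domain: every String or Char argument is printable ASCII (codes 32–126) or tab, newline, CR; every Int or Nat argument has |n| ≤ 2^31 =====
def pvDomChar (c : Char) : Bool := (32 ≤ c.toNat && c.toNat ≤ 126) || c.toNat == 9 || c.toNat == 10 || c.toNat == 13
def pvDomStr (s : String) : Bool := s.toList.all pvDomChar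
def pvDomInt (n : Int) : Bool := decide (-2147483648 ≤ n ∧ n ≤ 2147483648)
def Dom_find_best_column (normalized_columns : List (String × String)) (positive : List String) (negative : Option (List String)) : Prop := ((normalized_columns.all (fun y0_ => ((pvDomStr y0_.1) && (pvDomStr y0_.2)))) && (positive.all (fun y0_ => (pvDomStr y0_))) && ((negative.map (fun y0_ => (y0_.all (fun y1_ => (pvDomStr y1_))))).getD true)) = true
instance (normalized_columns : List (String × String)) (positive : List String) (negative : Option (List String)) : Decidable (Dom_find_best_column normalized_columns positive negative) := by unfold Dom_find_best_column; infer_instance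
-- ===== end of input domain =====

-- B replaces A's column-major scoring by a token-major accumulation into a score dict
-- plus a separate selection pass (objective: alternative decomposition, same cost).

-- ===== PORT A =====
-- A iterates dict items; the association list is read as Python's dict (first key wins
-- position, later value overwrites), i.e. PySem.Dict.ofList.
def find_best_column (normalized_columns : List (String × String)) (positive : List String) (negative : Option (List String)) : Option String :=
  let neg := negative.getD []
  (((PySem.Dict.ofList normalized_columns).items).foldl
    (fun (acc : Option String × Int) p =>
      let score : Int := positive.foldl
        (fun s token => if PySem.Str.isIn token p.2 then s + (if p.2 = token then 2 else 1) else s) 0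
      let score : Int := neg.foldl
        (fun s token => if PySem.Str.isIn token p.2 then s - (if p.2 = token then 2 else 1) else s) score
      if score > acc.2 then (some p.1, score) else acc)
    (none, 0)).1

-- ===== PORT B =====
def find_best_column_alt (normalized_columns : List (String × String)) (positive : List String) (negative : Option (List String)) : Option String :=
  let d := PySem.Dict.ofList normalized_columns
  let scores0 : PySem.Dict String Int := d.keys.foldl (fun sc k => sc.insert k 0) PySem.Dict.empty
  let scores1 := positive.foldl
    (fun sc token => d.items.foldl
      (fun (sc : PySem.Dict String Int) p =>
        if PySem.Str.isIn token p.2 then sc.modify p.1 0 (· + (if p.2 = token then 2 else 1)) else sc) sc)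
    scores0
  let scores2 := (negative.getD []).foldl
    (fun sc token => d.items.foldl
      (fun (sc : PySem.Dict String Int) p =>
        if PySem.Str.isIn token p.2 then sc.modify p.1 0 (· - (if p.2 = token then 2 else 1)) else sc) sc)
    scores1
  (d.keys.foldl
    (fun (acc : Option String × Int) k =>
      if scores2.getD k 0 > acc.2 then (some k, scores2.getD k 0) else acc)
    (none, 0)).1

-- ===== PRECONDITION & SPEC =====
def Spec_find_best_column (normalized_columns : List (String × String)) (positive : List String) (negative : Option (List String)) (out : Option String) : Prop := out = find_best_column_alt normalized_columns positive negative
instance (normalized_columns : List (String × String)) (positive : List String) (negative : Option (List String)) (out : Option String) : Decidable (Spec_find_best_column normalized_columns positive negative out) := by unfold Spec_find_best_column; infer_instance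

-- ===== CLAIM (what is proved, stated in full; the proofs are below) =====
def Claim_equal_find_best_column : Prop := ∀ (normalized_columns : List (String × String)) (positive : List String) (negative : Option (List String)), Dom_find_best_column normalized_columns positive negative → Spec_find_best_column normalized_columns positive negative (find_best_column normalized_columns positive negative)

-- ===== LEMMAS AND PROOFS =====

-- one inner pass (one token) does not touch a key absent from the pass's list
theorem pv_inner_notmem (l : List (String × String)) (g : String → Int → Int)
    (cond : String → Bool) (sc : PySem.Dict String Int) (o : String)
    (ho : o ∉ l.map (·.1)) :
    (l.foldl (fun (sc : PySem.Dict String Int) p =>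
        if cond p.2 then sc.modify p.1 0 (g p.2) else sc) sc).getD o 0 = sc.getD o 0 := by
  induction l generalizing sc with
  | nil => rfl
  | cons hd tl ih =>
    simp only [List.map_cons, List.mem_cons, not_or] at ho
    simp only [List.foldl_cons]
    rw [ih _ ho.2]
    by_cases hc : cond hd.2
    · simp only [hc, if_true]
      exact PySem.Dict.getD_modify_of_ne _ _ _ ho.1
    · simp [hc]

-- one inner pass updates the entry of (o, n) ∈ l exactly once
theorem pv_inner_get (l : List (String × String)) (g : String → Int → Int)
    (cond : String → Bool) (sc : PySem.Dict String Int) (o n : String)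
    (hnd : (l.map (·.1)).Nodup) (hmem : (o, n) ∈ l) :
    (l.foldl (fun (sc : PySem.Dict String Int) p =>
        if cond p.2 then sc.modify p.1 0 (g p.2) else sc) sc).getD o 0 =
      (if cond n then g n (sc.getD o 0) else sc.getD o 0) := by
  induction l generalizing sc with
  | nil => simp at hmem
  | cons hd tl ih =>
    simp only [List.map_cons, List.nodup_cons] at hnd
    rcases List.mem_cons.mp hmem with heq | hmemtl
    · rw [← heq] at hnd ⊢
      simp only [List.foldl_cons]
      rw [pv_inner_notmem _ _ _ _ _ hnd.1]
      by_cases hc : cond n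
      · simp only [hc, if_true]
        exact PySem.Dict.getD_modify_self _ _ _ _
      · simp [hc]
    · have hne : o ≠ hd.1 := by
        intro h
        exact hnd.1 (h ▸ List.mem_map.mpr ⟨(o, n), hmemtl, rfl⟩)
      simp only [List.foldl_cons]
      rw [ih _ hnd.2 hmemtl]
      have hstep : (if cond hd.2 then sc.modify hd.1 0 (g hd.2) else sc).getD o 0 = sc.getD o 0 := by
        by_cases hc : cond hd.2
        · simp only [hc, if_true]
          exact PySem.Dict.getD_modify_of_ne _ _ _ hne
        · simp [hc]
      rw [hstep]

-- a token-major fold of inner passes, read at one key, is that key's column-major token fold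
theorem pv_token_fold (ts : List String) (l : List (String × String))
    (g : String → String → Int → Int) (cond : String → String → Bool)
    (sc : PySem.Dict String Int) (o n : String)
    (hnd : (l.map (·.1)).Nodup) (hmem : (o, n) ∈ l) :
    (ts.foldl (fun sc token => l.foldl
        (fun (sc : PySem.Dict String Int) p =>
          if cond token p.2 then sc.modify p.1 0 (g token p.2) else sc) sc) sc).getD o 0 =
      ts.foldl (fun s token => if cond token n then g token n s else s) (sc.getD o 0) := by
  induction ts generalizing sc with
  | nil => rfl
  | cons t ts ih =>
    simp only [List.foldl_cons]
    rw [ih _, pv_inner_get _ _ _ _ _ _ hnd hmem]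

-- the initialisation pass leaves every score at 0
theorem pv_init_zero (ks : List String) (sc : PySem.Dict String Int) (o : String)
    (h : sc.getD o 0 = 0) :
    (ks.foldl (fun (sc : PySem.Dict String Int) k => sc.insert k 0) sc).getD o 0 = 0 := by
  induction ks generalizing sc with
  | nil => exact h
  | cons k ks ih =>
    simp only [List.foldl_cons]
    apply ih
    rw [PySem.Dict.getD_insert]
    split <;> simp [h]

-- ===== VERDICT (by name: the statement is the Claim_ definition above) =====
theorem find_best_column_spec : Claim_equal_find_best_column := by
  intro normalized_columns positive negative _
  unfold Spec_find_best_column find_best_column find_best_column_alt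
  simp only
  have hnd : ((PySem.Dict.ofList normalized_columns).items.map (·.1)).Nodup :=
    PySem.Dict.nodup_keys_ofList normalized_columns
  have hkeys : (PySem.Dict.ofList normalized_columns).keys
      = (PySem.Dict.ofList normalized_columns).items.map (·.1) := rfl
  rw [hkeys, List.foldl_map]
  congr 1
  apply PySem.List.foldl_congr_mem
  intro acc p hp
  have h0 : (((PySem.Dict.ofList normalized_columns).items.map (·.1)).foldl
      (fun (sc : PySem.Dict String Int) k => sc.insert k 0) PySem.Dict.empty).getD p.1 0 = 0 :=
    pv_init_zero _ _ _ (PySem.Dict.getD_empty _ _)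
  have h1 := pv_token_fold positive (PySem.Dict.ofList normalized_columns).items
    (fun token norm s => s + (if norm = token then 2 else 1))
    (fun token norm => PySem.Str.isIn token norm)
    (((PySem.Dict.ofList normalized_columns).items.map (·.1)).foldl
      (fun (sc : PySem.Dict String Int) k => sc.insert k 0) PySem.Dict.empty)
    p.1 p.2 hnd hp
  have h2 := pv_token_fold (negative.getD []) (PySem.Dict.ofList normalized_columns).items
    (fun token norm s => s - (if norm = token then 2 else 1))
    (fun token norm => PySem.Str.isIn token norm)
    (positive.foldl (fun sc token => (PySem.Dict.ofList normalized_columns).items.foldl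
        (fun (sc : PySem.Dict String Int) p =>
          if PySem.Str.isIn token p.2 then sc.modify p.1 0 (· + (if p.2 = token then 2 else 1)) else sc) sc)
      (((PySem.Dict.ofList normalized_columns).items.map (·.1)).foldl
        (fun (sc : PySem.Dict String Int) k => sc.insert k 0) PySem.Dict.empty))
    p.1 p.2 hnd hp
  beta_reduce at h1 h2
  rw [h1, h0] at h2
  rw [h2]
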